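-- pv_equiv track=rewrite | github.com/Lg-Ue/evaluacionPractica2VA | examenPractico2.py | binarizaImagenUmbralDiferencias
-- ===== SOURCE A (Python) =====
-- def binarizaImagenUmbralDiferencias(imagen, UMBRAL):
--   # Constantes de los niveles de gris
--   NEGRO = 0
--   BLANCO = 255
--   # Variables de la imagen binarizada
--   filasImagen = len(imagen)
--   columnasImagen = len(imagen[0])
--   imagenBinarizada = [[NEGRO] * columnasImagen for i in range(filasImagen)]
--   for i in range(1, filasImagen - 1): # Para cada fila con vecinos
--     for j in range(1, columnasImagen - 1): # Para cada columna con vecinos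
--       # Obtiene el valor del pixel
--       valorPixel = imagen[i][j]
--       for k in range(-1, 1): # Para cada fila del vecindario
--         for l in range(-1, 1): # Para cada columna del vecindario
--           # Obtiene el valor del vecino y la diferencia
--           valorVecino = imagen[i + k][j + l]
--           diferencia = abs(valorPixel - valorVecino)
--           if diferencia > UMBRAL: # Si la diferencia es mayor al umbral
--             # Marca el borde
--             imagenBinarizada[i][j] = BLANCO
--             imagenBinarizada[i + k][j + l] = BLANCO
--   return imagenBinarizada
-- ===== SOURCE B (Python) =====
-- def binarizaImagenUmbralDiferencias(imagen, UMBRAL):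
--     # Single pass: compute each output pixel once from its neighborhood, no mutation of neighbors.
--     NEGRO = 0
--     BLANCO = 255
--     filas = len(imagen)
--     cols = len(imagen[0])
--
--     def interior(i, j):
--         return 1 <= i <= filas - 2 and 1 <= j <= cols - 2
--
--     def esBorde(a, b):
--         v = imagen[a][b]
--         if interior(a, b) and any(abs(v - imagen[a + k][b + l]) > UMBRAL
--                                   for k in (-1, 0) for l in (-1, 0)):
--             return True
--         return any(interior(a + d, b + e) and abs(imagen[a + d][b + e] - v) > UMBRAL
--                    for d in (0, 1) for e in (0, 1))
--
--     return [[BLANCO if esBorde(a, b) else NEGRO for b in range(cols)]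
--             for a in range(filas)]
-- ===== Notes on version B (the rewrite author's own statement) =====
-- stated objective: alternative
-- what changed: A initialises an all-black grid and mutates it in place, marking both a pixel and its neighbor white inside four nested loops; B computes each output pixel exactly once in a single comprehension pass from a closed condition on its neighborhood (its own up-left differences if interior, plus the symmetric down-right condition covering being a marked neighbor of an interior pixel), never mutating anything.
-- outside the precondition, e.g. on binarizaImagenUmbralDiferencias([[1, 2], [3]], 0): A returns [[0, 0], [0, 0]], B raises IndexError
import Mathlib
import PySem

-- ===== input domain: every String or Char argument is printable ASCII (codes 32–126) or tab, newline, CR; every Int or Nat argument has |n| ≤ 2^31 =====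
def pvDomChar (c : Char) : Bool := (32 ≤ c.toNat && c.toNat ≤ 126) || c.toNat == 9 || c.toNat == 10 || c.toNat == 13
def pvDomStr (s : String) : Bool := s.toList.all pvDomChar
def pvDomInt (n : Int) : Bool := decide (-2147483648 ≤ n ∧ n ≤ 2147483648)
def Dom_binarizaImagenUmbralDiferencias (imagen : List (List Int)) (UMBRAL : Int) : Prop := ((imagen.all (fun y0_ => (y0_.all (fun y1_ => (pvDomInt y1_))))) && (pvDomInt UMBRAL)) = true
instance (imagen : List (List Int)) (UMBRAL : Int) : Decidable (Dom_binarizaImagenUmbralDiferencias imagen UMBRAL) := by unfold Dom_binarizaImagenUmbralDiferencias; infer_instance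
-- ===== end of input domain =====

-- B computes each output pixel once in a single pass from a closed neighborhood condition,
-- instead of A's in-place mutation marking both a pixel and its neighbors (objective: alternative).

-- ===== PORT A =====
-- imagen[i][j]; exact where the indices are in range (guaranteed wherever the ports read under Pre_)
def readPix (imagen : List (List Int)) (i j : Int) : Int :=
  (PySem.List.pyGet? ((PySem.List.pyGet? imagen i).getD []) j).getD 0

-- imagenBinarizada[i][j] = v; the writes of A always hit the grid in range (i,j ≥ 0, i < filas, j < cols)
def setCell (g : List (List Int)) (i j : Int) (v : Int) : List (List Int) :=
  if 0 ≤ i ∧ 0 ≤ j then g.modify i.toNat (fun row => row.set j.toNat v) else g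

def binarizaImagenUmbralDiferencias (imagen : List (List Int)) (UMBRAL : Int) : List (List Int) :=
  let NEGRO : Int := 0
  let BLANCO : Int := 255
  let filasImagen := imagen.length
  let columnasImagen := ((PySem.List.pyGet? imagen 0).getD []).length
  let imagenBinarizada := List.replicate filasImagen (List.replicate columnasImagen NEGRO)
  (PySem.List.pyRange 1 ((filasImagen : Int) - 1) 1).foldl (fun g i =>
    (PySem.List.pyRange 1 ((columnasImagen : Int) - 1) 1).foldl (fun g j =>
      let valorPixel := readPix imagen i j
      (PySem.List.pyRange (-1) 1 1).foldl (fun g k =>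
        (PySem.List.pyRange (-1) 1 1).foldl (fun g l =>
          let valorVecino := readPix imagen (i + k) (j + l)
          let diferencia := |valorPixel - valorVecino|
          if diferencia > UMBRAL then
            setCell (setCell g i j BLANCO) (i + k) (j + l) BLANCO
          else g) g) g) g) imagenBinarizada

-- ===== PORT B =====
def altInterior (filas cols : Nat) (i j : Int) : Bool :=
  decide (1 ≤ i ∧ i ≤ (filas : Int) - 2 ∧ 1 ≤ j ∧ j ≤ (cols : Int) - 2)

def esBorde (imagen : List (List Int)) (UMBRAL : Int) (filas cols : Nat) (a b : Int) : Bool :=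
  let v := readPix imagen a b
  if altInterior filas cols a b &&
     ([(-1 : Int), 0].any fun k => [(-1 : Int), 0].any fun l =>
        decide (|v - readPix imagen (a + k) (b + l)| > UMBRAL)) then
    true
  else
    [(0 : Int), 1].any fun d => [(0 : Int), 1].any fun e =>
      altInterior filas cols (a + d) (b + e) &&
      decide (|readPix imagen (a + d) (b + e) - v| > UMBRAL)

def binarizaImagenUmbralDiferencias_alt (imagen : List (List Int)) (UMBRAL : Int) : List (List Int) :=
  let filas := imagen.length
  let cols := ((PySem.List.pyGet? imagen 0).getD []).length
  (PySem.List.pyRange 0 (filas : Int) 1).map fun a =>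
    (PySem.List.pyRange 0 (cols : Int) 1).map fun b =>
      if esBorde imagen UMBRAL filas cols a b then (255 : Int) else 0

-- ===== PRECONDITION & SPEC =====
-- Pre_ excludes empty images (A raises IndexError on imagen[0]) and images with a row shorter
-- than row 0: there A may raise IndexError mid-scan or accidentally return when the short row
-- is never read, while B reads every cell of the len(imagen[0])-wide grid and raises.
def Pre_binarizaImagenUmbralDiferencias (imagen : List (List Int)) (UMBRAL : Int) : Prop :=
  imagen ≠ [] ∧ ∀ row ∈ imagen, ((PySem.List.pyGet? imagen 0).getD []).length ≤ row.length

instance (imagen : List (List Int)) (UMBRAL : Int) : Decidable (Pre_binarizaImagenUmbralDiferencias imagen UMBRAL) := by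
  unfold Pre_binarizaImagenUmbralDiferencias; infer_instance

def pvWitness_binarizaImagenUmbralDiferencias : List (List Int) × Int :=
  ([[1, 2, 3], [4, 50, 6], [7, 8, 9]], 10)

def Spec_binarizaImagenUmbralDiferencias (imagen : List (List Int)) (UMBRAL : Int) (out : List (List Int)) : Prop := out = binarizaImagenUmbralDiferencias_alt imagen UMBRAL
instance (imagen : List (List Int)) (UMBRAL : Int) (out : List (List Int)) : Decidable (Spec_binarizaImagenUmbralDiferencias imagen UMBRAL out) := by unfold Spec_binarizaImagenUmbralDiferencias; infer_instance

-- ===== CLAIM (what is proved, stated in full; the proofs are below) =====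
def Claim_equal_binarizaImagenUmbralDiferencias : Prop := ∀ (imagen : List (List Int)) (UMBRAL : Int), Dom_binarizaImagenUmbralDiferencias imagen UMBRAL → Pre_binarizaImagenUmbralDiferencias imagen UMBRAL → Spec_binarizaImagenUmbralDiferencias imagen UMBRAL (binarizaImagenUmbralDiferencias imagen UMBRAL)

-- ===== LEMMAS AND PROOFS =====

-- cell accessor used only by the proofs
def cellOf (g : List (List Int)) (a b : Nat) : Int := (g.getD a []).getD b 0

-- grid shape invariant
def Shape (f c : Nat) (g : List (List Int)) : Prop :=
  g.length = f ∧ ∀ (a : Nat) (h : a < g.length), g[a].length = c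

-- the write event of A's inner loop, as a condition on the target cell (a,b)
def P4 (imagen : List (List Int)) (U : Int) (a b : Nat) (i j k l : Int) : Bool :=
  decide (|readPix imagen i j - readPix imagen (i + k) (j + l)| > U ∧
    ((a = i.toNat ∧ b = j.toNat) ∨ (a = (i + k).toNat ∧ b = (j + l).toNat)))

-- "some iteration of A's four nested loops paints cell (a,b) white"
def WhiteA (imagen : List (List Int)) (U : Int) (f c : Nat) (a b : Nat) : Bool :=
  (PySem.List.pyRange 1 ((f : Int) - 1) 1).any fun i =>
    (PySem.List.pyRange 1 ((c : Int) - 1) 1).any fun j =>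
      (PySem.List.pyRange (-1) 1 1).any fun k =>
        (PySem.List.pyRange (-1) 1 1).any fun l => P4 imagen U a b i j k l

lemma shape_setCell {f c : Nat} {g : List (List Int)} (hg : Shape f c g) (i j : Int) (v : Int) :
    Shape f c (setCell g i j v) := by
  unfold setCell
  split_ifs with h
  · refine ⟨by simpa using hg.1, ?_⟩
    intro a ha
    rw [List.getElem_modify]
    split_ifs with he
    · simp [hg.2 a (by simpa using ha)]
    · exact hg.2 a (by simpa using ha)
  · exact hg

lemma cell_setCell {f c : Nat} {g : List (List Int)} (hg : Shape f c g) {i j : Int} (v : Int)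
    (h0i : 0 ≤ i) (h0j : 0 ≤ j) (hi : i.toNat < f) (hj : j.toNat < c) (a b : Nat) :
    cellOf (setCell g i j v) a b = if a = i.toNat ∧ b = j.toNat then v else cellOf g a b := by
  unfold setCell cellOf
  rw [if_pos ⟨h0i, h0j⟩]
  simp only [List.getD_eq_getElem?_getD, List.getElem?_modify]
  by_cases ha : a < g.length
  · rw [List.getElem?_eq_getElem ha]
    have hrl : g[a].length = c := hg.2 a ha
    by_cases he : i.toNat = a
    · simp only [Option.map_eq_map, Option.map_some, Option.getD_some, if_pos he]
      rw [List.getElem?_set]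
      by_cases hb : j.toNat = b
      · subst he
        subst hb
        simp [hrl, hj]
      · have hna : ¬(a = i.toNat ∧ b = j.toNat) := fun h => hb h.2.symm
        simp [hb, hna]
    · simp only [Option.map_eq_map, Option.map_some, Option.getD_some, if_neg he]
      have hna : ¬(a = i.toNat ∧ b = j.toNat) := fun h => he h.1.symm
      simp [hna]
  · have hlen : g.length ≤ a := by omega
    rw [List.getElem?_eq_none hlen]
    have hna : ¬(a = i.toNat ∧ b = j.toNat) := by
      have := hg.1
      intro h
      omega
    simp [hna]

lemma shape_foldl {α : Type} {f c : Nat} (step : List (List Int) → α → List (List Int)) (xs : List α)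
    (h : ∀ g, Shape f c g → ∀ x ∈ xs, Shape f c (step g x)) :
    ∀ g, Shape f c g → Shape f c (xs.foldl step g) := by
  induction xs with
  | nil => intro g hg; exact hg
  | cons x xs ih =>
    intro g hg
    exact ih (fun g hg y hy => h g hg y (List.mem_cons_of_mem _ hy)) _ (h g hg x (List.mem_cons_self))

lemma cell_foldl_char {α : Type} {f c : Nat} (step : List (List Int) → α → List (List Int))
    (P : α → Bool) (a b : Nat) (xs : List α)
    (hInv : ∀ g, Shape f c g → ∀ x ∈ xs, Shape f c (step g x))
    (h : ∀ g, Shape f c g → ∀ x ∈ xs, cellOf (step g x) a b = if P x then 255 else cellOf g a b) :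
    ∀ g, Shape f c g → cellOf (xs.foldl step g) a b = if xs.any P then 255 else cellOf g a b := by
  induction xs with
  | nil => intro g hg; simp
  | cons x xs ih =>
    intro g hg
    have hstep := h g hg x (List.mem_cons_self)
    have hrest := ih (fun g hg y hy => hInv g hg y (List.mem_cons_of_mem _ hy))
      (fun g hg y hy => h g hg y (List.mem_cons_of_mem _ hy))
      (step g x) (hInv g hg x (List.mem_cons_self))
    rw [List.foldl_cons, hrest, hstep]
    by_cases hP : P x <;> by_cases hE : xs.any P <;> simp [hP, hE]

-- the body of A's innermost loop paints (a,b) white exactly when P4 holds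
lemma cell_inner (imagen : List (List Int)) (U : Int) (f c : Nat) (a b : Nat)
    {g : List (List Int)} (hg : Shape f c g) {i j k l : Int}
    (hi : 1 ≤ i ∧ i < (f : Int) - 1) (hj : 1 ≤ j ∧ j < (c : Int) - 1)
    (hk : -1 ≤ k ∧ k < 1) (hl : -1 ≤ l ∧ l < 1) :
    cellOf (if |readPix imagen i j - readPix imagen (i + k) (j + l)| > U
            then setCell (setCell g i j 255) (i + k) (j + l) 255 else g) a b
      = if P4 imagen U a b i j k l then 255 else cellOf g a b := by
  by_cases hd : |readPix imagen i j - readPix imagen (i + k) (j + l)| > U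
  · rw [if_pos hd]
    rw [cell_setCell (shape_setCell hg i j 255) 255 (by omega) (by omega) (by omega) (by omega) a b]
    rw [cell_setCell hg 255 (by omega) (by omega) (by omega) (by omega) a b]
    simp only [P4, decide_eq_true_eq]
    split_ifs <;> tauto
  · rw [if_neg hd]
    simp [P4, hd]

lemma shape_inner (imagen : List (List Int)) (U : Int) (f c : Nat)
    {g : List (List Int)} (hg : Shape f c g) {i j k l : Int}
    (hi : 1 ≤ i ∧ i < (f : Int) - 1) (hj : 1 ≤ j ∧ j < (c : Int) - 1)
    (hk : -1 ≤ k ∧ k < 1) (hl : -1 ≤ l ∧ l < 1) :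
    Shape f c (if |readPix imagen i j - readPix imagen (i + k) (j + l)| > U
               then setCell (setCell g i j 255) (i + k) (j + l) 255 else g) := by
  split_ifs
  · exact shape_setCell (shape_setCell hg i j 255) (i + k) (j + l) 255
  · exact hg

-- pointwise characterisation of A's result
lemma A_char (imagen : List (List Int)) (U : Int) (a b : Nat) :
    cellOf (binarizaImagenUmbralDiferencias imagen U) a b
      = if WhiteA imagen U imagen.length ((PySem.List.pyGet? imagen 0).getD []).length a b
        then 255 else 0 := by
  set f := imagen.length with hf
  set c := ((PySem.List.pyGet? imagen 0).getD []).length with hc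
  have hg0 : Shape f c (List.replicate f (List.replicate c (0 : Int))) := by
    constructor
    · simp
    · intro a ha; simp
  have hcell0 : cellOf (List.replicate f (List.replicate c (0 : Int))) a b = 0 := by
    unfold cellOf
    by_cases ha : a < f
    · rw [List.getD_replicate _ (by simpa using ha)]
      by_cases hb : b < c
      · rw [List.getD_replicate _ (by simpa using hb)]
      · simp [List.getD_eq_getElem?_getD, List.getElem?_eq_none (by simpa using hb)]
    · simp [List.getD_eq_getElem?_getD, List.getElem?_eq_none (l := List.replicate f (List.replicate c (0:Int))) (by simpa using ha)]
  show cellOf ((PySem.List.pyRange 1 ((f : Int) - 1) 1).foldl _ _) a b = _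
  rw [cell_foldl_char _
      (fun i => (PySem.List.pyRange 1 ((c : Int) - 1) 1).any fun j =>
        (PySem.List.pyRange (-1) 1 1).any fun k =>
          (PySem.List.pyRange (-1) 1 1).any fun l => P4 imagen U a b i j k l) a b _
      ?hInvI ?hI _ hg0, hcell0]
  · rfl
  case hInvI =>
    intro g hg i hi
    refine shape_foldl _ _ ?_ g hg
    intro g hg j hj
    refine shape_foldl _ _ ?_ g hg
    intro g hg k hk
    refine shape_foldl _ _ ?_ g hg
    intro g hg l hl
    exact shape_inner imagen U f c hg
      ((PySem.List.mem_pyRange_one).1 hi) ((PySem.List.mem_pyRange_one).1 hj)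
      ((PySem.List.mem_pyRange_one).1 hk) ((PySem.List.mem_pyRange_one).1 hl)
  case hI =>
    intro g hg i hi
    rw [cell_foldl_char _
        (fun j => (PySem.List.pyRange (-1) 1 1).any fun k =>
          (PySem.List.pyRange (-1) 1 1).any fun l => P4 imagen U a b i j k l) a b _
        ?_ ?_ g hg]
    · intro g hg j hj
      refine shape_foldl _ _ ?_ g hg
      intro g hg k hk
      refine shape_foldl _ _ ?_ g hg
      intro g hg l hl
      exact shape_inner imagen U f c hg
        ((PySem.List.mem_pyRange_one).1 hi) ((PySem.List.mem_pyRange_one).1 hj)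
        ((PySem.List.mem_pyRange_one).1 hk) ((PySem.List.mem_pyRange_one).1 hl)
    · intro g hg j hj
      rw [cell_foldl_char _
          (fun k => (PySem.List.pyRange (-1) 1 1).any fun l => P4 imagen U a b i j k l) a b _
          ?_ ?_ g hg]
      · intro g hg k hk
        refine shape_foldl _ _ ?_ g hg
        intro g hg l hl
        exact shape_inner imagen U f c hg
          ((PySem.List.mem_pyRange_one).1 hi) ((PySem.List.mem_pyRange_one).1 hj)
          ((PySem.List.mem_pyRange_one).1 hk) ((PySem.List.mem_pyRange_one).1 hl)
      · intro g hg k hk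
        rw [cell_foldl_char _
            (fun l => P4 imagen U a b i j k l) a b _ ?_ ?_ g hg]
        · intro g hg l hl
          exact shape_inner imagen U f c hg
            ((PySem.List.mem_pyRange_one).1 hi) ((PySem.List.mem_pyRange_one).1 hj)
            ((PySem.List.mem_pyRange_one).1 hk) ((PySem.List.mem_pyRange_one).1 hl)
        · intro g hg l hl
          exact cell_inner imagen U f c a b hg
            ((PySem.List.mem_pyRange_one).1 hi) ((PySem.List.mem_pyRange_one).1 hj)
            ((PySem.List.mem_pyRange_one).1 hk) ((PySem.List.mem_pyRange_one).1 hl)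

-- A's marking condition over the neighborhood equals B's single-pass condition
lemma white_iff_borde (imagen : List (List Int)) (U : Int) (f c : Nat) (a b : Nat)
    (ha : a < f) (hb : b < c) :
    WhiteA imagen U f c a b = esBorde imagen U f c (a : Int) (b : Int) := by
  rw [Bool.eq_iff_iff]
  simp only [WhiteA, esBorde, altInterior, P4, List.any_eq_true, PySem.List.mem_pyRange_one,
    decide_eq_true_eq, List.any_cons, List.any_nil, Bool.or_eq_true, Bool.and_eq_true,
    Bool.if_true_left, Bool.false_or, Bool.or_false]
  simp only [add_zero]
  constructor
  · rintro ⟨i, ⟨hi1, hi2⟩, j, ⟨hj1, hj2⟩, k, ⟨hk1, hk2⟩, l, ⟨hl1, hl2⟩, hd, hm | hm⟩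
    · obtain rfl : i = (a : Int) := by omega
      obtain rfl : j = (b : Int) := by omega
      left
      refine ⟨⟨by omega, by omega, by omega, by omega⟩, ?_⟩
      have hk' : k = -1 ∨ k = 0 := by omega
      have hl' : l = -1 ∨ l = 0 := by omega
      rcases hk' with rfl | rfl <;> rcases hl' with rfl | rfl <;>
        (try simp only [add_zero] at hd) <;> tauto
    · have hk' : k = -1 ∨ k = 0 := by omega
      have hl' : l = -1 ∨ l = 0 := by omega
      right
      rcases hk' with rfl | rfl <;> rcases hl' with rfl | rfl
      · obtain rfl : i = (a : Int) + 1 := by omega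
        obtain rfl : j = (b : Int) + 1 := by omega
        rw [show ((a : Int) + 1) + -1 = (a : Int) by ring,
          show ((b : Int) + 1) + -1 = (b : Int) by ring] at hd
        exact Or.inr (Or.inr ⟨⟨by omega, by omega, by omega, by omega⟩, hd⟩)
      · obtain rfl : i = (a : Int) + 1 := by omega
        obtain rfl : j = (b : Int) := by omega
        simp only [add_zero] at hd
        rw [show ((a : Int) + 1) + -1 = (a : Int) by ring] at hd
        exact Or.inr (Or.inl ⟨⟨by omega, by omega, by omega, by omega⟩, hd⟩)
      · obtain rfl : i = (a : Int) := by omega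
        obtain rfl : j = (b : Int) + 1 := by omega
        simp only [add_zero] at hd
        rw [show ((b : Int) + 1) + -1 = (b : Int) by ring] at hd
        exact Or.inl (Or.inr ⟨⟨by omega, by omega, by omega, by omega⟩, hd⟩)
      · obtain rfl : i = (a : Int) := by omega
        obtain rfl : j = (b : Int) := by omega
        simp only [add_zero] at hd
        exact Or.inl (Or.inl ⟨⟨by omega, by omega, by omega, by omega⟩, hd⟩)
  · rintro (⟨⟨h1, h2, h3, h4⟩, (hd | hd) | (hd | hd)⟩ | ((⟨⟨h1, h2, h3, h4⟩, hd⟩ | ⟨⟨h1, h2, h3, h4⟩, hd⟩) | (⟨⟨h1, h2, h3, h4⟩, hd⟩ | ⟨⟨h1, h2, h3, h4⟩, hd⟩)))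
    · exact ⟨(a : Int), ⟨by omega, by omega⟩, (b : Int), ⟨by omega, by omega⟩, -1,
        ⟨by omega, by omega⟩, -1, ⟨by omega, by omega⟩, hd, Or.inl ⟨by omega, by omega⟩⟩
    · exact ⟨(a : Int), ⟨by omega, by omega⟩, (b : Int), ⟨by omega, by omega⟩, -1,
        ⟨by omega, by omega⟩, 0, ⟨by omega, by omega⟩, by simpa using hd, Or.inl ⟨by omega, by omega⟩⟩
    · exact ⟨(a : Int), ⟨by omega, by omega⟩, (b : Int), ⟨by omega, by omega⟩, 0,
        ⟨by omega, by omega⟩, -1, ⟨by omega, by omega⟩, by simpa using hd, Or.inl ⟨by omega, by omega⟩⟩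
    · exact ⟨(a : Int), ⟨by omega, by omega⟩, (b : Int), ⟨by omega, by omega⟩, 0,
        ⟨by omega, by omega⟩, 0, ⟨by omega, by omega⟩, by simpa using hd, Or.inl ⟨by omega, by omega⟩⟩
    · -- d = 0, e = 0 : interior (a,b) itself, zero self-difference
      exact ⟨(a : Int), ⟨by omega, by omega⟩, (b : Int), ⟨by omega, by omega⟩, 0,
        ⟨by omega, by omega⟩, 0, ⟨by omega, by omega⟩, by simpa using hd, Or.inl ⟨by omega, by omega⟩⟩
    · -- d = 0, e = 1
      refine ⟨(a : Int), ⟨by omega, by omega⟩, (b : Int) + 1, ⟨by omega, by omega⟩, 0,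
        ⟨by omega, by omega⟩, -1, ⟨by omega, by omega⟩, ?_, Or.inr ⟨by omega, by omega⟩⟩
      rw [show ((b : Int) + 1) + -1 = (b : Int) by ring]
      simpa using hd
    · -- d = 1, e = 0
      refine ⟨(a : Int) + 1, ⟨by omega, by omega⟩, (b : Int), ⟨by omega, by omega⟩, -1,
        ⟨by omega, by omega⟩, 0, ⟨by omega, by omega⟩, ?_, Or.inr ⟨by omega, by omega⟩⟩
      rw [show ((a : Int) + 1) + -1 = (a : Int) by ring]
      simpa using hd
    · -- d = 1, e = 1
      refine ⟨(a : Int) + 1, ⟨by omega, by omega⟩, (b : Int) + 1, ⟨by omega, by omega⟩, -1,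
        ⟨by omega, by omega⟩, -1, ⟨by omega, by omega⟩, ?_, Or.inr ⟨by omega, by omega⟩⟩
      rw [show ((a : Int) + 1) + -1 = (a : Int) by ring,
        show ((b : Int) + 1) + -1 = (b : Int) by ring]
      exact hd

lemma shape_A (imagen : List (List Int)) (U : Int) :
    Shape imagen.length ((PySem.List.pyGet? imagen 0).getD []).length
      (binarizaImagenUmbralDiferencias imagen U) := by
  set f := imagen.length with hf
  set c := ((PySem.List.pyGet? imagen 0).getD []).length with hc
  have hg0 : Shape f c (List.replicate f (List.replicate c (0 : Int))) := by
    constructor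
    · simp
    · intro a ha; simp
  show Shape f c ((PySem.List.pyRange 1 ((f : Int) - 1) 1).foldl _ _)
  refine shape_foldl _ _ ?_ _ hg0
  intro g hg i hi
  refine shape_foldl _ _ ?_ g hg
  intro g hg j hj
  refine shape_foldl _ _ ?_ g hg
  intro g hg k hk
  refine shape_foldl _ _ ?_ g hg
  intro g hg l hl
  exact shape_inner imagen U f c hg
    ((PySem.List.mem_pyRange_one).1 hi) ((PySem.List.mem_pyRange_one).1 hj)
    ((PySem.List.mem_pyRange_one).1 hk) ((PySem.List.mem_pyRange_one).1 hl)

lemma shape_B (imagen : List (List Int)) (U : Int) :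
    Shape imagen.length ((PySem.List.pyGet? imagen 0).getD []).length
      (binarizaImagenUmbralDiferencias_alt imagen U) := by
  constructor
  · simp [binarizaImagenUmbralDiferencias_alt, PySem.List.length_pyRange_one]
  · intro a ha
    simp [binarizaImagenUmbralDiferencias_alt, PySem.List.length_pyRange_one]

lemma cellOf_eq_getElem (g : List (List Int)) (a b : Nat)
    (h1 : a < g.length) (g1 : b < g[a].length) : cellOf g a b = g[a][b] := by
  unfold cellOf
  rw [List.getD_eq_getElem?_getD (l := g), List.getElem?_eq_getElem h1, Option.getD_some,
    List.getD_eq_getElem?_getD, List.getElem?_eq_getElem g1, Option.getD_some]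

lemma B_char (imagen : List (List Int)) (U : Int) (a b : Nat)
    (ha : a < imagen.length) (hb : b < ((PySem.List.pyGet? imagen 0).getD []).length) :
    cellOf (binarizaImagenUmbralDiferencias_alt imagen U) a b
      = if esBorde imagen U imagen.length ((PySem.List.pyGet? imagen 0).getD []).length (a : Int) (b : Int)
        then 255 else 0 := by
  have hB := shape_B imagen U
  have h1 : a < (binarizaImagenUmbralDiferencias_alt imagen U).length := by
    have := hB.1
    omega
  have g1 : b < (binarizaImagenUmbralDiferencias_alt imagen U)[a].length := by
    have := hB.2 a h1
    omega
  rw [cellOf_eq_getElem _ a b h1 g1]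
  simp [binarizaImagenUmbralDiferencias_alt, PySem.List.getElem_pyRange_one]

lemma ports_eq (imagen : List (List Int)) (U : Int) :
    binarizaImagenUmbralDiferencias imagen U = binarizaImagenUmbralDiferencias_alt imagen U := by
  set f := imagen.length with hf
  set c := ((PySem.List.pyGet? imagen 0).getD []).length with hc
  have hA := shape_A imagen U
  have hB := shape_B imagen U
  apply List.ext_getElem (by rw [hA.1, hB.1])
  intro a h1 h2
  apply List.ext_getElem (by rw [hA.2 a h1, hB.2 a h2])
  intro b g1 g2
  have ha : a < f := by
    have := hA.1
    omega
  have hb : b < c := by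
    have := hA.2 a h1
    omega
  rw [← cellOf_eq_getElem _ a b h1 g1, ← cellOf_eq_getElem _ a b h2 g2, A_char,
    B_char imagen U a b ha hb, white_iff_borde imagen U f c a b ha hb]

-- ===== VERDICT (by name: the statement is the Claim_ definition above) =====
theorem binarizaImagenUmbralDiferencias_spec : Claim_equal_binarizaImagenUmbralDiferencias := by
  intro imagen UMBRAL _ _
  exact ports_eq imagen UMBRAL
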